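-- pv_equiv track=rewrite | github.com/IvanKalug-QA/codewars | Concatenated_Sum.py | check_concatenated_sum
-- ===== SOURCE A (Python) =====
-- def check_concatenated_sum(n, t):
--     if t == 0:
--         return False
--     l = list()
--     start = n
--     flag = False
--     if n < 0:
--         flag = True
--     if flag:
--         n = str(n)[1::]
--     else:
--         n = str(n)
--     for i in n:
--         l.append(int(i*t))
--     if flag:
--         if len(l) == 1:
--             return True
--         return -int(sum(l)) == start
--     return sum(l) == start
-- ===== SOURCE B (Python) =====
-- def check_concatenated_sum(n, t):
--     if t == 0:
--         return False
--     repunit = (10 ** t - 1) // 9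
--     a = abs(n)
--     s = 0
--     m = a
--     while m:
--         s += m % 10
--         m //= 10
--     return repunit * s == a
-- ===== Notes on version B (the rewrite author's own statement) =====
-- stated objective: alternative
-- what changed: Replaces per-digit string repetition and int() re-parsing by arithmetic: one repunit (10**t-1)//9 computed once and a %10-//10 digit-sum loop, returning repunit*digitsum == abs(n); no strings are built.
-- intended difference: For single-digit negative n (-9 <= n <= -1) with t >= 2, A returns True unconditionally (its len==1 early return ignores t), while B returns False because the t-fold repunit sum 11...1*|n| can no longer equal |n|; B's value is the intended check. — e.g. on check_concatenated_sum(-3, 2): A returns true, B returns false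
import Mathlib
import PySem

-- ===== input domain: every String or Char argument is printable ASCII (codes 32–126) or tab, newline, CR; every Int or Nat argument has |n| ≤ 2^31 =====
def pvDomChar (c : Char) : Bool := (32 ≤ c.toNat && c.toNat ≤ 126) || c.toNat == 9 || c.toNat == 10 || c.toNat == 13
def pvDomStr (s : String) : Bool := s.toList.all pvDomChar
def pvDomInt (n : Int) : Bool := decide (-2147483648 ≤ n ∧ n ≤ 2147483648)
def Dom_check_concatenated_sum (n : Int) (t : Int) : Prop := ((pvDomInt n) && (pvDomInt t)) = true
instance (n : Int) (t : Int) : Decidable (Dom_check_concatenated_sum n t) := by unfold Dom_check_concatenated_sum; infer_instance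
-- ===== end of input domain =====

-- B replaces A's per-digit string repetition + int() re-parsing by pure arithmetic
-- (one repunit (10**t-1)//9 and a %10-digit-sum loop); on single-digit negative n with
-- t ≥ 2 A's unconditional True is replaced by the intended comparison (see D_ below).

-- ===== PORT A =====
-- hand port of int(s): exact for nonempty ASCII digit strings, the only strings A passes
-- to int() on inputs admitted by Pre_ (a digit of str(n) repeated t ≥ 1 ≤ 4300 times)
def pyIntOfDigits (cs : List Char) : Int :=
  cs.foldl (fun a c => 10 * a + ((c.toNat : Int) - 48)) 0

def check_concatenated_sum (n : Int) (t : Int) : Bool :=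
  if t == 0 then false
  else
    let start := n
    let flag : Bool := n < 0
    -- str(n)[1::] / str(n)
    let s : List Char := if flag then PySem.List.slice (PySem.Int.toChars n) (some 1) none
                         else PySem.Int.toChars n
    -- for i in n: l.append(int(i*t))
    let l : List Int := s.foldl (fun acc c => acc ++ [pyIntOfDigits (PySem.List.pyRepeat [c] t)]) []
    if flag then
      if l.length == 1 then true
      else -(l.sum) == start
    else l.sum == start

-- ===== PORT B =====
-- the while-loop of Source B: while m: s += m % 10; m //= 10
def sumLoop (m : Nat) (s : Int) : Int :=
  if m = 0 then s else sumLoop (m / 10) (s + ((m % 10 : Nat) : Int))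
decreasing_by exact Nat.div_lt_self (Nat.pos_of_ne_zero (by assumption)) (by omega)

def check_concatenated_sum_alt (n : Int) (t : Int) : Bool :=
  if t == 0 then false
  else
    -- 10 ** t: exponent t.toNat is exact on Pre_ (0 ≤ t)
    let repunit : Int := PySem.Int.floordiv (10 ^ t.toNat - 1) 9
    let a : Int := (n.natAbs : Int)
    let s : Int := sumLoop n.natAbs 0
    repunit * s == a

-- ===== PRECONDITION & SPEC =====
-- Pre_ excludes exactly the inputs where A raises ValueError: t < 0 (int('') on the empty
-- repetition) and t > 4300 (CPython's int-from-string digit limit).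
def Pre_check_concatenated_sum (n : Int) (t : Int) : Prop := 0 ≤ t ∧ t ≤ 4300
instance (n : Int) (t : Int) : Decidable (Pre_check_concatenated_sum n t) := by
  unfold Pre_check_concatenated_sum; infer_instance

def pvWitness_check_concatenated_sum : Int × Int := (5, 2)

-- For single-digit negative n (-9 ≤ n ≤ -1) with t ≥ 2, A returns True unconditionally (its
-- len==1 early return ignores t), while B returns False because the repeated-digit sum
-- repunit*|n| can no longer equal |n|; B's value is the intended check.
def D_check_concatenated_sum (n : Int) (t : Int) : Prop := -9 ≤ n ∧ n ≤ -1 ∧ 2 ≤ t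
instance (n : Int) (t : Int) : Decidable (D_check_concatenated_sum n t) := by
  unfold D_check_concatenated_sum; infer_instance

def Spec_check_concatenated_sum (n : Int) (t : Int) (out : Bool) : Prop :=
  ¬ D_check_concatenated_sum n t → out = check_concatenated_sum_alt n t
instance (n : Int) (t : Int) (out : Bool) : Decidable (Spec_check_concatenated_sum n t out) := by
  unfold Spec_check_concatenated_sum; infer_instance

def pvDiffWitness_check_concatenated_sum : Int × Int := (-3, 2)
def pvDiffWitnessOut_check_concatenated_sum : Bool × Bool := (true, false)

-- ===== CLAIM (what is proved, stated in full; the proofs are below) =====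
def Claim_unchanged_check_concatenated_sum : Prop := ∀ (n : Int) (t : Int), Dom_check_concatenated_sum n t → Pre_check_concatenated_sum n t → Spec_check_concatenated_sum n t (check_concatenated_sum n t)
def Claim_changed_check_concatenated_sum : Prop := Dom_check_concatenated_sum (pvDiffWitness_check_concatenated_sum.1) (pvDiffWitness_check_concatenated_sum.2) ∧ Pre_check_concatenated_sum (pvDiffWitness_check_concatenated_sum.1) (pvDiffWitness_check_concatenated_sum.2) ∧ D_check_concatenated_sum (pvDiffWitness_check_concatenated_sum.1) (pvDiffWitness_check_concatenated_sum.2) ∧ check_concatenated_sum (pvDiffWitness_check_concatenated_sum.1) (pvDiffWitness_check_concatenated_sum.2) = pvDiffWitnessOut_check_concatenated_sum.1 ∧ check_concatenated_sum_alt (pvDiffWitness_check_concatenated_sum.1) (pvDiffWitness_check_concatenated_sum.2) = pvDiffWitnessOut_check_concatenated_sum.2 ∧ pvDiffWitnessOut_check_concatenated_sum.1 ≠ pvDiffWitnessOut_check_concatenated_sum.2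
def Claim_exact_check_concatenated_sum : Prop := ∀ (n : Int) (t : Int), Dom_check_concatenated_sum n t → Pre_check_concatenated_sum n t → D_check_concatenated_sum n t → check_concatenated_sum n t ≠ check_concatenated_sum_alt n t

-- ===== LEMMAS AND PROOFS =====

-- the digit string of m (most significant first), as a clean well-founded recursion
def myDigits (m : Nat) : List Char :=
  if m < 10 then [Nat.digitChar m] else myDigits (m / 10) ++ [Nat.digitChar (m % 10)]
decreasing_by exact Nat.div_lt_self (by omega) (by omega)

-- the repunit 11⋯1 (k ones)
def repu : Nat → Int
  | 0 => 0
  | k + 1 => 10 * repu k + 1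

-- the digit sum of m
def dsum (m : Nat) : Int :=
  if m = 0 then 0 else ((m % 10 : Nat) : Int) + dsum (m / 10)
decreasing_by exact Nat.div_lt_self (Nat.pos_of_ne_zero (by assumption)) (by omega)

lemma toDigitsCore_eq : ∀ (f n : Nat) (l : List Char), n < f →
    Nat.toDigitsCore 10 f n l = myDigits n ++ l := by
  intro f
  induction f with
  | zero => omega
  | succ f ih =>
    intro n l hn
    rw [Nat.toDigitsCore]
    by_cases h : n / 10 = 0
    · rw [myDigits]
      have h10 : n < 10 := by omega
      simp [h10, Nat.mod_eq_of_lt h10, h]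
    · have hn10 : ¬ n < 10 := by omega
      rw [ih (n / 10) _ (by omega)]
      conv_rhs => rw [myDigits]
      simp [hn10]

lemma toDigits_eq (n : Nat) : Nat.toDigits 10 n = myDigits n := by
  rw [Nat.toDigits, toDigitsCore_eq (n + 1) n [] (by omega), List.append_nil]

lemma parse_replicate (c : Char) (k : Nat) :
    pyIntOfDigits (List.replicate k c) = ((c.toNat : Int) - 48) * repu k := by
  induction k with
  | zero => simp [pyIntOfDigits, repu]
  | succ k ih =>
    rw [List.replicate_succ', pyIntOfDigits, List.foldl_append]
    rw [pyIntOfDigits] at ih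
    simp only [List.foldl_cons, List.foldl_nil, ih, repu]
    ring

lemma nine_repu (k : Nat) : 9 * repu k = 10 ^ k - 1 := by
  induction k with
  | zero => simp [repu]
  | succ k ih => rw [repu, pow_succ]; linarith

lemma floordiv_repunit (k : Nat) :
    PySem.Int.floordiv ((10 : Int) ^ k - 1) 9 = repu k := by
  rw [(PySem.Int.floordiv_eq_iff_of_pos (by norm_num) : _ ↔ _)]
  have := nine_repu k
  constructor <;> linarith

lemma one_le_repu (k : Nat) (hk : 1 ≤ k) : 1 ≤ repu k := by
  induction k with
  | zero => omega
  | succ k ih =>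
    rw [repu]
    rcases Nat.eq_zero_or_pos k with h | h
    · subst h; simp [repu]
    · have := ih h; omega

lemma eleven_le_repu (k : Nat) (hk : 2 ≤ k) : 11 ≤ repu k := by
  obtain ⟨j, rfl⟩ : ∃ j, k = j + 1 := ⟨k - 1, by omega⟩
  rw [repu]
  have := one_le_repu j (by omega)
  omega

lemma sumLoop_eq (m : Nat) (s : Int) : sumLoop m s = s + dsum m := by
  fun_induction sumLoop with
  | case1 s => rw [dsum]; simp
  | case2 m s hm ih =>
    rw [ih]
    conv_rhs => rw [dsum]
    rw [if_neg hm]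
    ring

lemma digitChar_toNat (d : Nat) (h : d < 10) : (Nat.digitChar d).toNat = 48 + d := by
  interval_cases d <;> rfl

lemma dsum_small (m : Nat) (h : m < 10) : dsum m = (m : Int) := by
  by_cases h0 : m = 0
  · subst h0; rw [dsum]; simp
  · have hdiv : m / 10 = 0 := by omega
    rw [dsum, if_neg h0, Nat.mod_eq_of_lt h, hdiv, dsum]
    simp

lemma myDigits_sum (m : Nat) (k : Nat) :
    ((myDigits m).map (fun c => ((c.toNat : Int) - 48) * repu k)).sum = repu k * dsum m := by
  fun_induction myDigits with
  | case1 m h =>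
    simp only [List.map_cons, List.map_nil, List.sum_cons, List.sum_nil,
      digitChar_toNat m h, dsum_small m h]
    push_cast
    ring
  | case2 m h ih =>
    have hm : ¬ m = 0 := by omega
    rw [dsum, if_neg hm]
    simp only [List.map_append, List.sum_append, ih, List.map_cons, List.map_nil,
      List.sum_cons, List.sum_nil, digitChar_toNat (m % 10) (by omega)]
    push_cast
    ring

lemma myDigits_ne_nil (m : Nat) : myDigits m ≠ [] := by
  rw [myDigits]; split <;> simp

lemma myDigits_length_eq_one_iff (m : Nat) : (myDigits m).length = 1 ↔ m < 10 := by
  rw [myDigits]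
  by_cases h : m < 10
  · simp [h]
  · have hne : (myDigits (m / 10)).length ≠ 0 := by
      simpa using myDigits_ne_nil (m / 10)
    simp [h, List.length_append, myDigits_ne_nil]

-- A's list l, simplified: the map of the per-character value over the digit chars
lemma build_l (s : List Char) (t : Int) :
    s.foldl (fun acc c => acc ++ [pyIntOfDigits (PySem.List.pyRepeat [c] t)]) [] =
      s.map (fun c => ((c.toNat : Int) - 48) * repu t.toNat) := by
  rw [PySem.List.foldl_append_singleton_eq_map]
  simp only [List.nil_append]
  exact List.map_congr_left fun c _ => by
    rw [PySem.List.pyRepeat_singleton, parse_replicate]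

lemma B_eval (n t : Int) (ht : t ≠ 0) :
    check_concatenated_sum_alt n t =
      (repu t.toNat * dsum n.natAbs == (n.natAbs : Int)) := by
  simp only [check_concatenated_sum_alt, beq_iff_eq, if_neg ht, floordiv_repunit,
    sumLoop_eq, zero_add]

lemma A_pos (n t : Int) (hn : ¬ n < 0) (ht : t ≠ 0) :
    check_concatenated_sum n t = (repu t.toNat * dsum n.toNat == n) := by
  simp only [check_concatenated_sum, beq_iff_eq, if_neg ht, hn, decide_false,
    Bool.false_eq_true, if_false, PySem.Int.toChars, if_neg hn, toDigits_eq, build_l,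
    myDigits_sum]

lemma A_neg_sum (n t : Int) (hn : n < 0) (ht : t ≠ 0) :
    check_concatenated_sum n t =
      (if (myDigits n.natAbs).length == 1 then true
       else (-(repu t.toNat * dsum n.natAbs) == n)) := by
  simp only [check_concatenated_sum, beq_iff_eq, if_neg ht, hn, decide_true, if_true,
    PySem.Int.toChars, toDigits_eq]
  rw [PySem.List.slice_from_one]
  simp only [List.tail_cons, build_l, myDigits_sum, List.length_map]

theorem pv_main : ∀ (n t : Int), Pre_check_concatenated_sum n t →
    ¬ D_check_concatenated_sum n t →
    check_concatenated_sum n t = check_concatenated_sum_alt n t := by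
  intro n t hpre hnd
  obtain ⟨ht0, ht4300⟩ := hpre
  by_cases ht : t = 0
  · subst ht; simp [check_concatenated_sum, check_concatenated_sum_alt]
  · rw [B_eval n t ht]
    have hk1 : 1 ≤ t.toNat := by omega
    by_cases hn : n < 0
    · rw [A_neg_sum n t hn ht]
      by_cases hm : n.natAbs < 10
      · rw [if_pos (by simpa [beq_iff_eq] using (myDigits_length_eq_one_iff n.natAbs).mpr hm)]
        have ht1 : t = 1 := by
          unfold D_check_concatenated_sum at hnd; omega
        have : t.toNat = 1 := by omega
        rw [this, dsum_small n.natAbs hm]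
        simp [repu]
      · rw [if_neg (by simpa [beq_iff_eq] using
          (not_iff_not.mpr (myDigits_length_eq_one_iff n.natAbs)).mpr hm)]
        apply Bool.eq_iff_iff.mpr
        simp only [beq_iff_eq]
        omega
    · rw [A_pos n t hn ht]
      have hab : n.natAbs = n.toNat := by omega
      rw [hab]
      apply Bool.eq_iff_iff.mpr
      simp only [beq_iff_eq]
      omega

-- ===== VERDICT (by name: the statement is the Claim_ definition above) =====
theorem check_concatenated_sum_spec : Claim_unchanged_check_concatenated_sum := by
  intro n t _ hpre hnd
  exact pv_main n t hpre hnd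

theorem check_concatenated_sum_changed : Claim_changed_check_concatenated_sum := by
  unfold Claim_changed_check_concatenated_sum
  refine ⟨by decide, by decide, by decide, by decide, ?_, by decide⟩
  show check_concatenated_sum_alt (-3) 2 = false
  rw [B_eval (-3) 2 (by norm_num)]
  rw [show ((-3 : Int)).natAbs = 3 from rfl, show ((2 : Int)).toNat = 2 from rfl,
    dsum_small 3 (by omega), show repu 2 = 11 from by simp [repu]]
  decide

theorem check_concatenated_sum_tight : Claim_exact_check_concatenated_sum := by
  intro n t _ hpre hd
  obtain ⟨h1, h2, h3⟩ := hd
  have ht : t ≠ 0 := by omega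
  have hm : n.natAbs < 10 := by omega
  have hm1 : 1 ≤ n.natAbs := by omega
  rw [A_neg_sum n t (by omega) ht,
    if_pos (by simpa [beq_iff_eq] using (myDigits_length_eq_one_iff n.natAbs).mpr hm),
    B_eval n t ht, dsum_small n.natAbs hm]
  have h11 : 11 ≤ repu t.toNat := eleven_le_repu t.toNat (by omega)
  have hne : repu t.toNat * (n.natAbs : Int) ≠ (n.natAbs : Int) := by
    nlinarith [Int.natCast_pos.mpr hm1]
  simp only [ne_eq]
  intro h
  exact hne (by simpa using h.symm)
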